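-- pv_equiv track=rewrite | github.com/yasaminaali/AI-in-3D-Printing | src/core/zones.py | zones_checkerboard
-- ===== SOURCE A (Python) =====
-- from typing import Dict, Tuple, List
--
-- Point = Tuple[int, int]
--
-- def zones_checkerboard(W: int, H: int, size: int = 2) -> Dict[Point, int]:
--     """
--     Create checkerboard pattern zones.
--
--     Args:
--         W: Grid width
--         H: Grid height
--         size: Size of each checkerboard square
--
--     Returns:
--         Dictionary mapping (x, y) to zone ID
--     """
--     zones = {}
--     for y in range(H):
--         for x in range(W):
--             checker_x = x // size
--             checker_y = y // size
--             zones[(x, y)] = 1 if (checker_x + checker_y) % 2 == 0 else 2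
--     return zones
-- ===== SOURCE B (Python) =====
-- def zones_checkerboard(W, H, size=2):
--     if W <= 0 or H <= 0:
--         return {}
--     even_row = [1 if (x // size) % 2 == 0 else 2 for x in range(W)]
--     odd_row = [3 - v for v in even_row]
--     zones = {}
--     for y in range(H):
--         row = even_row if (y // size) % 2 == 0 else odd_row
--         for x, v in enumerate(row):
--             zones[(x, y)] = v
--     return zones
-- ===== Notes on version B (the rewrite author's own statement) =====
-- stated objective: alternative
-- what changed: B precomputes two whole-row templates (even_row for even checker rows, odd_row as its complement 3-v) and stamps the selected template across each grid row by enumeration, so no per-cell division or parity arithmetic happens in the fill loop, unlike A which recomputes x//size, y//size and a sum-parity test for every cell.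
import Mathlib
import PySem

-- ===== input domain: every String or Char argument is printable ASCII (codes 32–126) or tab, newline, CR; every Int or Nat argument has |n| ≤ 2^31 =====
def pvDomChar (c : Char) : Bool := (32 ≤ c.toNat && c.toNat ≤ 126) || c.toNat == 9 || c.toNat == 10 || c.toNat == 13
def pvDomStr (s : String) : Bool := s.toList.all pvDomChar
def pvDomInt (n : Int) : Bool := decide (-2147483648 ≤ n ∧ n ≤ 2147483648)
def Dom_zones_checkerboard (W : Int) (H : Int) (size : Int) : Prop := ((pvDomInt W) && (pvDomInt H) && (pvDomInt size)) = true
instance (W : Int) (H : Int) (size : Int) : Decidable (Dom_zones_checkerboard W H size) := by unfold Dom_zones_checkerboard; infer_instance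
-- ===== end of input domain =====

-- B precomputes two whole-row templates and stamps the selected one across each grid row, instead of A's per-cell parity arithmetic (objective: alternative decomposition).

-- ===== PORT A =====
-- nested for-loops filling a dict cell by cell, recomputing x//size and y//size per cell
def zones_checkerboard (W : Int) (H : Int) (size : Int) : List (Int × Int × Int) :=
  let zones : PySem.Dict (Int × Int) Int :=
    (PySem.List.pyRange 0 H 1).foldl (fun z y =>
      (PySem.List.pyRange 0 W 1).foldl (fun z x =>
        -- checker_x = x // size, checker_y = y // size (inlined)
        z.insert (x, y)
          (if PySem.Int.mod (PySem.Int.floordiv x size + PySem.Int.floordiv y size) 2 = 0 then 1 else 2)) z)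
      PySem.Dict.empty
  zones.items.map (fun p => (p.1.1, p.1.2, p.2))

-- ===== PORT B =====
-- early return on an empty grid; two row templates even_row/odd_row; per grid row the selected template is stamped via enumerate
def zones_checkerboard_alt (W : Int) (H : Int) (size : Int) : List (Int × Int × Int) :=
  if W ≤ 0 ∨ H ≤ 0 then []
  else
    let even_row := (PySem.List.pyRange 0 W 1).map
      (fun x => if PySem.Int.mod (PySem.Int.floordiv x size) 2 = 0 then (1 : Int) else 2)
    let odd_row := even_row.map (fun v => 3 - v)
    let zones : PySem.Dict (Int × Int) Int :=
      (PySem.List.pyRange 0 H 1).foldl (fun z y =>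
        (PySem.List.enumerate (if PySem.Int.mod (PySem.Int.floordiv y size) 2 = 0 then even_row else odd_row)).foldl
          (fun z p => z.insert (p.1, y) p.2) z)
        PySem.Dict.empty
    zones.items.map (fun p => (p.1.1, p.1.2, p.2))

-- ===== PRECONDITION & SPEC =====
-- Pre_ excludes exactly the inputs where A raises ZeroDivisionError: size = 0 with a non-empty grid (W > 0 and H > 0).
def Pre_zones_checkerboard (W : Int) (H : Int) (size : Int) : Prop := size ≠ 0 ∨ W ≤ 0 ∨ H ≤ 0
instance (W : Int) (H : Int) (size : Int) : Decidable (Pre_zones_checkerboard W H size) := by unfold Pre_zones_checkerboard; infer_instance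
def pvWitness_zones_checkerboard : Int × Int × Int := (4, 3, 2)

def Spec_zones_checkerboard (W : Int) (H : Int) (size : Int) (out : List (Int × Int × Int)) : Prop := out = zones_checkerboard_alt W H size
instance (W : Int) (H : Int) (size : Int) (out : List (Int × Int × Int)) : Decidable (Spec_zones_checkerboard W H size out) := by unfold Spec_zones_checkerboard; infer_instance

-- ===== CLAIM (what is proved, stated in full; the proofs are below) =====
def Claim_equal_zones_checkerboard : Prop := ∀ (W : Int) (H : Int) (size : Int), Dom_zones_checkerboard W H size → Pre_zones_checkerboard W H size → Spec_zones_checkerboard W H size (zones_checkerboard W H size)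

-- ===== LEMMAS AND PROOFS =====

-- A nested dict-filling loop whose inner pass inserts keys (kx g, y) with distinct
-- x-components, over distinct y's, inserts only fresh keys, so its items list is the
-- rows appended in order.  (Used for BOTH ports' fill loops.)
theorem pv_outer_items {γ : Type} (inner : Int → List γ) (kx : Int → γ → Int) (vf : Int → γ → Int)
    (hx : ∀ y, ((inner y).map (kx y)).Nodup)
    (ys : List Int) (hnd : ys.Nodup)
    (d : PySem.Dict (Int × Int) Int) (hf : ∀ p ∈ d.keys, p.2 ∉ ys) :
    (ys.foldl (fun z y =>
        (inner y).foldl (fun z g => z.insert (kx y g, y) (vf y g)) z) d).items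
      = d.items ++ ys.flatMap (fun y =>
          (inner y).map (fun g => ((kx y g, y), vf y g))) := by
  induction ys generalizing d with
  | nil => simp
  | cons y ys ih =>
    simp only [List.foldl_cons, List.flatMap_cons]
    have hfresh : ∀ g ∈ inner y, d.contains ((kx y g, y)) = false := by
      intro g _
      by_contra h
      have : d.contains (kx y g, y) = true := by
        cases hc : d.contains (kx y g, y) with
        | false => exact absurd hc h
        | true => rfl
      have := (PySem.Dict.contains_iff_mem_keys d (kx y g, y)).1 this
      exact hf _ this (List.mem_cons_self)
    have hnodk : ((inner y).map (fun g => ((kx y g, y) : Int × Int))).Nodup := by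
      have : (inner y).map (fun g => ((kx y g, y) : Int × Int))
          = ((inner y).map (kx y)).map (fun x => (x, y)) := by
        simp [List.map_map]
      rw [this]
      exact List.Nodup.map (fun a b hab => by simpa using congrArg Prod.fst hab) (hx y)
    have hrow := PySem.Dict.items_foldl_insert_fresh (inner y)
      (fun g => ((kx y g, y) : Int × Int)) (fun g => vf y g) d hfresh hnodk
    have hkeys : ∀ p ∈ ((inner y).foldl
        (fun z g => z.insert (kx y g, y) (vf y g)) d).keys, p.2 ∉ ys := by
      intro p hp
      have : p ∈ PySem.Set.update d.keys ((inner y).map (fun g => ((kx y g, y) : Int × Int))) := by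
        have hk := PySem.Dict.keys_foldl_insert_key (ν := Int) (inner y)
          (fun g => ((kx y g, y) : Int × Int)) (fun _ g => vf y g) d
        rw [hk] at hp
        exact hp
      rcases (PySem.Set.mem_update _ _ _).1 this with h1 | h2
      · exact fun hmem => hf p h1 (List.mem_cons_of_mem _ hmem)
      · rcases List.mem_map.1 h2 with ⟨g, _, rfl⟩
        intro hmem
        exact (List.nodup_cons.1 hnd).1 hmem
    rw [ih (List.nodup_cons.1 hnd).2 _ hkeys, hrow]
    simp

-- parity of a sum of two ints, mod taken with positive modulus 2
theorem pv_parity (a b : Int) :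
    (PySem.Int.mod (a + b) 2 = 0) ↔ (PySem.Int.mod a 2 = PySem.Int.mod b 2) := by
  rw [PySem.Int.mod_eq_emod_of_pos (by norm_num), PySem.Int.mod_eq_emod_of_pos (by norm_num),
    PySem.Int.mod_eq_emod_of_pos (by norm_num)]
  omega

-- ===== VERDICT (by name: the statement is the Claim_ definition above) =====
theorem zones_checkerboard_spec : Claim_equal_zones_checkerboard := by
  intro W H size _ hpre
  unfold Spec_zones_checkerboard zones_checkerboard zones_checkerboard_alt
  by_cases hdeg : W ≤ 0 ∨ H ≤ 0
  · have hA := pv_outer_items (fun _ => PySem.List.pyRange 0 W 1) (fun _ x => x)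
      (fun y x => if PySem.Int.mod (PySem.Int.floordiv x size + PySem.Int.floordiv y size) 2 = 0 then (1 : Int) else 2)
      (fun _ => by simpa [List.map_id'] using PySem.List.nodup_pyRange_one 0 W)
      (PySem.List.pyRange 0 H 1) (PySem.List.nodup_pyRange_one 0 H) PySem.Dict.empty
      (by simp [PySem.Dict.keys_empty])
    simp only []
    rw [if_pos hdeg, hA]
    rcases hdeg with h | h
    · simp [PySem.List.pyRange_one_eq_nil h, PySem.Dict.empty]
    · simp [PySem.List.pyRange_one_eq_nil h, PySem.Dict.empty]
  · rw [not_or, not_le, not_le] at hdeg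
    have hsize : size ≠ 0 := by
      rcases hpre with h | h | h
      · exact h
      · omega
      · omega
    set even_row := (PySem.List.pyRange 0 W 1).map
      (fun x => if PySem.Int.mod (PySem.Int.floordiv x size) 2 = 0 then (1 : Int) else 2) with hrow1
    have hA := pv_outer_items (fun _ => PySem.List.pyRange 0 W 1) (fun _ x => x)
      (fun y x => if PySem.Int.mod (PySem.Int.floordiv x size + PySem.Int.floordiv y size) 2 = 0 then (1 : Int) else 2)
      (fun _ => by simpa [List.map_id'] using PySem.List.nodup_pyRange_one 0 W)
      (PySem.List.pyRange 0 H 1) (PySem.List.nodup_pyRange_one 0 H) PySem.Dict.empty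
      (by simp [PySem.Dict.keys_empty])
    have hB := pv_outer_items
      (fun y => PySem.List.enumerate (if PySem.Int.mod (PySem.Int.floordiv y size) 2 = 0 then even_row else even_row.map (fun v => 3 - v)))
      (fun _ p => p.1) (fun _ p => p.2)
      (fun y => by
        rw [PySem.List.map_fst_enumerate]
        exact PySem.List.nodup_pyRange_one _ _)
      (PySem.List.pyRange 0 H 1) (PySem.List.nodup_pyRange_one 0 H) PySem.Dict.empty
      (by simp [PySem.Dict.keys_empty])
    simp only []
    rw [if_neg (by rw [not_or, not_le, not_le]; exact hdeg)]
    rw [hA, hB]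
    have hempty : (PySem.Dict.empty : PySem.Dict (Int × Int) Int).items = [] := rfl
    rw [hempty, List.nil_append, List.nil_append, List.map_flatMap, List.map_flatMap]
    apply List.flatMap_congr
    intro y hy
    beta_reduce
    have hym := (PySem.List.mem_pyRange_one).1 hy
    -- rewrite the enumerated template row as a map over pyRange 0 W 1
    have hlen : PySem.List.len (if PySem.Int.mod (PySem.Int.floordiv y size) 2 = 0 then even_row
        else even_row.map (fun v => 3 - v)) = W := by
      split <;> simp [PySem.List.len, hrow1, PySem.List.length_pyRange_one] <;> omega
    rw [PySem.List.enumerate_eq_map_pyRange _ 0, hlen]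
    simp only [List.map_map]
    apply List.map_congr_left
    intro x hx
    have hxm := (PySem.List.mem_pyRange_one).1 hx
    simp only [Function.comp_apply]
    congr 1
    congr 1
    -- the stamped template value at x equals A's per-cell parity value
    have hyp : PySem.Int.mod (PySem.Int.floordiv y size) 2 = 0 ∨
        PySem.Int.mod (PySem.Int.floordiv y size) 2 = 1 := by
      rw [PySem.Int.mod_eq_emod_of_pos (by norm_num)]
      omega
    have hget1 : PySem.List.pyGetD even_row x 0
        = (if PySem.Int.mod (PySem.Int.floordiv x size) 2 = 0 then (1 : Int) else 2) := by
      rw [hrow1]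
      exact PySem.List.pyGetD_map_pyRange_of_nonneg _ _ _ _ hxm.1 hxm.2
    have hget2 : PySem.List.pyGetD (even_row.map (fun v => 3 - v)) x 0
        = 3 - (if PySem.Int.mod (PySem.Int.floordiv x size) 2 = 0 then (1 : Int) else 2) := by
      rw [hrow1, List.map_map]
      exact PySem.List.pyGetD_map_pyRange_of_nonneg _ _ _ _ hxm.1 hxm.2
    have hxp : PySem.Int.mod (PySem.Int.floordiv x size) 2 = 0 ∨
        PySem.Int.mod (PySem.Int.floordiv x size) 2 = 1 := by
      rw [PySem.Int.mod_eq_emod_of_pos (by norm_num)]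
      omega
    rcases hyp with hy0 | hy1
    · rw [if_pos hy0, hget1]
      by_cases hp : PySem.Int.mod (PySem.Int.floordiv x size) 2 = 0
      · rw [if_pos ((pv_parity _ _).2 (hp.trans hy0.symm)), if_pos hp]
      · rw [if_neg (fun h => hp (((pv_parity _ _).1 h).trans hy0)), if_neg hp]
    · rw [if_neg (show ¬ PySem.Int.mod (PySem.Int.floordiv y size) 2 = 0 by rw [hy1]; norm_num), hget2]
      rcases hxp with hx0 | hx1
      · have hne : ¬ PySem.Int.mod (PySem.Int.floordiv x size + PySem.Int.floordiv y size) 2 = 0 := by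
          intro h
          have := (pv_parity _ _).1 h
          rw [hx0, hy1] at this
          norm_num at this
        rw [if_neg hne, if_pos hx0]
        norm_num
      · rw [if_pos ((pv_parity _ _).2 (hx1.trans hy1.symm)),
          if_neg (by rw [hx1]; norm_num)]
        norm_num
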